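-- pv_equiv track=rewrite | github.com/smohapatra1/scripting | python/practice/start_again/2024/05302024/angry_children_2.py | angryChildren
-- ===== SOURCE A (Python) =====
-- def angryChildren(k, packets):
--     # Write your code here
--     packets.sort()
--     n = len(packets)
--     s = -packets[0]
--     d = 0
--     for i in range(k):
--         s += packets[i]
--         d += (2*i-k+1)*packets[i]
--     ans = d
--     for shift in range(1,n-k):
--         d += (- 2*s + (k-1)*(packets[shift-1]+packets[shift+k-1]))
--         s += (packets[shift+k-1]-packets[shift])
--         ans = min(ans,d)
--     return ans
-- ===== SOURCE B (Python) =====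
-- def angryChildren(k, packets):
--     packets.sort()
--     n = len(packets)
--     P = [0]
--     Q = [0]
--     for j in range(n):
--         P.append(P[-1] + packets[j])
--         Q.append(Q[-1] + j * packets[j])
--
--     def win(l):
--         sp = P[l + k] - P[l]
--         sq = Q[l + k] - Q[l]
--         return 2 * sq - (2 * l + k - 1) * sp
--
--     ans = win(0)
--     for l in range(1, n - k):
--         ans = min(ans, win(l))
--     return ans
-- ===== Notes on version B (the rewrite author's own statement) =====
-- stated objective: alternative
-- what changed: B replaces A's incrementally maintained running window sum and running pairwise-difference total by two prefix-sum arrays (sum and index-weighted sum) built once, evaluating each window's pairwise-difference total with a closed-form formula instead of A's sliding recurrence.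
import Mathlib
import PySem

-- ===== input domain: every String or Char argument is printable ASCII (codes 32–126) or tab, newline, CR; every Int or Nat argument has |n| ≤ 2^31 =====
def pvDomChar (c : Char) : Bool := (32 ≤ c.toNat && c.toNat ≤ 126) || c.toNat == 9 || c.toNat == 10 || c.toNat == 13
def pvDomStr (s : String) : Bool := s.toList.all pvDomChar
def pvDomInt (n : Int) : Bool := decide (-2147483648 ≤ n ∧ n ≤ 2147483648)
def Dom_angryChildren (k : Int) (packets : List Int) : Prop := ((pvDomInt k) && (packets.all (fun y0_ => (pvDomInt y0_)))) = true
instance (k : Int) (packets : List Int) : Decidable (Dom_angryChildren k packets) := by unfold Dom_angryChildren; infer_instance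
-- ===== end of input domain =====

-- B replaces A's running-difference recurrence by prefix-sum arrays with a closed-form window formula
-- (objective: alternative). Both A and B sort the argument list; the equivalence proved is about the
-- return value (B performs the same in-place sort).

-- ===== PORT A =====
def angryChildren (k : Int) (packets : List Int) : Int :=
  let a := PySem.List.sorted packets (fun x => x) false
  let n : Int := a.length
  let sd :=
    (PySem.List.pyRange 0 k 1).foldl
      (fun (sd : Int × Int) i =>
        (sd.1 + PySem.List.pyGetD a i 0,
         sd.2 + (2 * i - k + 1) * PySem.List.pyGetD a i 0))
      (-(PySem.List.pyGetD a 0 0), 0)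
  let res :=
    (PySem.List.pyRange 1 (n - k) 1).foldl
      (fun (st : Int × Int × Int) shift =>
        let d := st.2.1 + (-2 * st.1 + (k - 1) *
                   (PySem.List.pyGetD a (shift - 1) 0 + PySem.List.pyGetD a (shift + k - 1) 0))
        let s := st.1 + (PySem.List.pyGetD a (shift + k - 1) 0 - PySem.List.pyGetD a shift 0)
        (s, d, min st.2.2 d))
      (sd.1, sd.2, sd.2)
  res.2.2

-- ===== PORT B =====
def angryChildren_alt (k : Int) (packets : List Int) : Int :=
  let a := PySem.List.sorted packets (fun x => x) false
  let n : Int := a.length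
  let PQ :=
    (PySem.List.pyRange 0 n 1).foldl
      (fun (pq : List Int × List Int) j =>
        (pq.1 ++ [PySem.List.pyGetD pq.1 (-1) 0 + PySem.List.pyGetD a j 0],
         pq.2 ++ [PySem.List.pyGetD pq.2 (-1) 0 + j * PySem.List.pyGetD a j 0]))
      ([0], [0])
  let win := fun (l : Int) =>
    let sp := PySem.List.pyGetD PQ.1 (l + k) 0 - PySem.List.pyGetD PQ.1 l 0
    let sq := PySem.List.pyGetD PQ.2 (l + k) 0 - PySem.List.pyGetD PQ.2 l 0
    2 * sq - (2 * l + k - 1) * sp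
  (PySem.List.pyRange 1 (n - k) 1).foldl (fun ans l => min ans (win l)) (win 0)

-- ===== PRECONDITION & SPEC =====
-- Pre_ is exactly the set of inputs on which the Python A returns normally: A raises IndexError
-- on an empty list (packets[0]), on k > len(packets) (first loop) and on k < 0 (second loop).
def Pre_angryChildren (k : Int) (packets : List Int) : Prop :=
  packets ≠ [] ∧ 0 ≤ k ∧ k ≤ (packets.length : Int)
instance (k : Int) (packets : List Int) : Decidable (Pre_angryChildren k packets) := by
  unfold Pre_angryChildren; infer_instance

def pvWitness_angryChildren : Int × List Int := (2, [3, 1, 2, 5])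

def Spec_angryChildren (k : Int) (packets : List Int) (out : Int) : Prop := out = angryChildren_alt k packets
instance (k : Int) (packets : List Int) (out : Int) : Decidable (Spec_angryChildren k packets out) := by unfold Spec_angryChildren; infer_instance

-- ===== CLAIM (what is proved, stated in full; the proofs are below) =====
def Claim_equal_angryChildren : Prop := ∀ (k : Int) (packets : List Int), Dom_angryChildren k packets → Pre_angryChildren k packets → Spec_angryChildren k packets (angryChildren k packets)

-- ===== LEMMAS AND PROOFS =====

theorem idx_map_range (g : Nat → Int) (n : Nat) (i : Int) (h0 : 0 ≤ i) (h1 : i ≤ (n : Int)) :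
    PySem.List.pyGetD ((List.range (n + 1)).map g) i 0 = g i.toNat := by
  rw [PySem.List.pyGetD_eq_getElem _ _ h0 (by simp; omega)]
  simp

def pf (a : List Int) : Nat → Int
  | 0 => 0
  | m + 1 => pf a m + a.getD m 0

def qf (a : List Int) : Nat → Int
  | 0 => 0
  | m + 1 => qf a m + (m : Int) * a.getD m 0

def Wn (a : List Int) (k : Int) (l : Nat) : Int :=
  2 * (qf a (l + k.toNat) - qf a l) - (2 * (l : Int) + k - 1) * (pf a (l + k.toNat) - pf a l)

theorem Wn_zero (a : List Int) (k : Int) :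
    Wn a k 0 = 2 * qf a k.toNat - (k - 1) * pf a k.toNat := by
  simp [Wn, pf, qf]

theorem loop1 (a : List Int) (k : Int) (t : Nat) :
    (PySem.List.pyRange 0 (t : Int) 1).foldl
      (fun (sd : Int × Int) i =>
        (sd.1 + PySem.List.pyGetD a i 0,
         sd.2 + (2 * i - k + 1) * PySem.List.pyGetD a i 0))
      (-(PySem.List.pyGetD a 0 0), 0)
    = (-(a.getD 0 0) + pf a t, 2 * qf a t - (k - 1) * pf a t) := by
  induction t with
  | zero => simp [PySem.List.pyRange_one_eq_nil, pf, qf, PySem.List.pyGetD_zero]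
  | succ t ih =>
    rw [show ((t + 1 : Nat) : Int) = (t : Int) + 1 by push_cast; ring,
        PySem.List.pyRange_one_succ_right (by positivity), List.foldl_append, ih]
    simp [pf, qf, PySem.List.pyGetD_natCast]
    exact ⟨by ring, by ring⟩

theorem build_PQ (a : List Int) (t : Nat) :
    (PySem.List.pyRange 0 (t : Int) 1).foldl
      (fun (pq : List Int × List Int) j =>
        (pq.1 ++ [PySem.List.pyGetD pq.1 (-1) 0 + PySem.List.pyGetD a j 0],
         pq.2 ++ [PySem.List.pyGetD pq.2 (-1) 0 + j * PySem.List.pyGetD a j 0]))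
      ([0], [0])
    = ((List.range (t + 1)).map (pf a), (List.range (t + 1)).map (qf a)) := by
  induction t with
  | zero => simp [PySem.List.pyRange_one_eq_nil, pf, qf]
  | succ t ih =>
    rw [show ((t + 1 : Nat) : Int) = (t : Int) + 1 by push_cast; ring,
        PySem.List.pyRange_one_succ_right (by positivity), List.foldl_append, ih]
    rw [List.range_succ]
    simp only [List.range_succ, List.map_append, List.map_cons, List.map_nil, List.foldl_cons,
      List.foldl_nil, PySem.List.pyGetD_neg_one_append_singleton, PySem.List.pyGetD_natCast]
    simp [pf, qf]

theorem Wn_step (a : List Int) (k : Int) (m : Nat) (hk : 0 ≤ k) (hm : 1 ≤ m) :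
    Wn a k m = Wn a k (m - 1) +
      (-2 * (pf a (m + k.toNat - 1) - pf a m) +
        (k - 1) * (a.getD (m - 1) 0 + a.getD (m + k.toNat - 1) 0)) := by
  obtain ⟨m', rfl⟩ : ∃ m', m = m' + 1 := ⟨m - 1, by omega⟩
  have hκ : k = (k.toNat : Int) := (Int.toNat_of_nonneg hk).symm
  rw [hκ]
  generalize k.toNat = κ
  rw [Wn, Wn]
  simp only [Int.toNat_natCast]
  simp only [show m' + 1 - 1 = m' from by omega, show m' + 1 + κ = (m' + κ) + 1 from by omega,
    show m' + κ + 1 - 1 = m' + κ from by omega]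
  simp only [pf, qf]
  push_cast
  ring

theorem loop2 (a : List Int) (k : Int) (m : Nat) (hk : 0 ≤ k) (hm : 1 ≤ m)
    (hmn : m + k.toNat ≤ a.length) :
    (PySem.List.pyRange 1 (m : Int) 1).foldl
      (fun (st : Int × Int × Int) shift =>
        let d := st.2.1 + (-2 * st.1 + (k - 1) *
                   (PySem.List.pyGetD a (shift - 1) 0 + PySem.List.pyGetD a (shift + k - 1) 0))
        let s := st.1 + (PySem.List.pyGetD a (shift + k - 1) 0 - PySem.List.pyGetD a shift 0)
        (s, d, min st.2.2 d))
      (-(a.getD 0 0) + pf a k.toNat,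
       2 * qf a k.toNat - (k - 1) * pf a k.toNat,
       2 * qf a k.toNat - (k - 1) * pf a k.toNat)
    = (pf a (m - 1 + k.toNat) - pf a m, Wn a k (m - 1),
       (PySem.List.pyRange 1 (m : Int) 1).foldl (fun ans l => min ans (Wn a k l.toNat))
         (2 * qf a k.toNat - (k - 1) * pf a k.toNat)) := by
  induction m, hm using Nat.le_induction with
  | base =>
    rw [PySem.List.pyRange_one_eq_nil (by norm_num)]
    simp [pf, Wn_zero]
    ring
  | succ m hm ih =>
    have hmn' : m + k.toNat ≤ a.length := by omega
    rw [show ((m + 1 : Nat) : Int) = (m : Int) + 1 by push_cast; ring,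
        PySem.List.pyRange_one_succ_right (by exact_mod_cast hm), List.foldl_append,
        List.foldl_append, ih hmn']
    simp only [List.foldl_cons, List.foldl_nil]
    have g1 : PySem.List.pyGetD a ((m : Int) - 1) 0 = a.getD (m - 1) 0 := by
      rw [show (m : Int) - 1 = ((m - 1 : Nat) : Int) by omega, PySem.List.pyGetD_natCast]
    have g2 : PySem.List.pyGetD a ((m : Int) + k - 1) 0 = a.getD (m + k.toNat - 1) 0 := by
      rw [show (m : Int) + k - 1 = ((m + k.toNat - 1 : Nat) : Int) by omega,
        PySem.List.pyGetD_natCast]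
    have g3 : PySem.List.pyGetD a (m : Int) 0 = a.getD m 0 := PySem.List.pyGetD_natCast a m 0
    have hw := Wn_step a k m hk hm
    refine Prod.ext ?_ (Prod.ext ?_ ?_)
    · show pf a (m - 1 + k.toNat) - pf a m +
        (PySem.List.pyGetD a ((m:Int) + k - 1) 0 - PySem.List.pyGetD a (m:Int) 0)
        = pf a (m + 1 - 1 + k.toNat) - pf a (m + 1)
      rw [g2, g3]
      have e1 : m + 1 - 1 + k.toNat = (m + k.toNat - 1) + 1 := by omega
      have e2 : m - 1 + k.toNat = m + k.toNat - 1 := by omega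
      rw [e1, e2, pf]
      simp [pf]
      ring
    · show Wn a k (m - 1) + (-2 * (pf a (m - 1 + k.toNat) - pf a m) + (k - 1) *
        (PySem.List.pyGetD a ((m:Int) - 1) 0 + PySem.List.pyGetD a ((m:Int) + k - 1) 0))
        = Wn a k (m + 1 - 1)
      rw [g1, g2, show m + 1 - 1 = m from by omega, hw,
        show m - 1 + k.toNat = m + k.toNat - 1 from by omega]
    · show min ((PySem.List.pyRange 1 (m:Int) 1).foldl (fun ans l => min ans (Wn a k l.toNat))
          (2 * qf a k.toNat - (k - 1) * pf a k.toNat))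
          (Wn a k (m - 1) + (-2 * (pf a (m - 1 + k.toNat) - pf a m) + (k - 1) *
            (PySem.List.pyGetD a ((m:Int) - 1) 0 + PySem.List.pyGetD a ((m:Int) + k - 1) 0)))
        = min ((PySem.List.pyRange 1 (m:Int) 1).foldl (fun ans l => min ans (Wn a k l.toNat))
          (2 * qf a k.toNat - (k - 1) * pf a k.toNat)) (Wn a k ((m:Int)).toNat)
      rw [g1, g2, show m - 1 + k.toNat = m + k.toNat - 1 from by omega, Int.toNat_natCast, hw]

-- ===== VERDICT (by name: the statement is the Claim_ definition above) =====
theorem angryChildren_spec : Claim_equal_angryChildren := by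
  intro k packets _hdom hpre
  obtain ⟨hne, hk0, hkn⟩ := hpre
  unfold Spec_angryChildren angryChildren angryChildren_alt
  simp only []
  set a := PySem.List.sorted packets (fun x => x) false with ha
  have hlen : a.length = packets.length := PySem.List.length_sorted _ _ _
  have hkn' : k ≤ (a.length : Int) := by rw [hlen]; exact hkn
  rw [show PySem.List.pyRange 0 k = PySem.List.pyRange 0 ((k.toNat : Nat) : Int) from by
        rw [Int.toNat_of_nonneg hk0]]
  rw [loop1 a k k.toNat, build_PQ a a.length]
  dsimp only
  have hidx : ∀ (g : Nat → Int) (i : Int), 0 ≤ i → i ≤ (a.length : Int) →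
      PySem.List.pyGetD ((List.range (a.length + 1)).map g) i 0 = g i.toNat := fun g i h0 h1 =>
    idx_map_range g a.length i h0 h1
  have hP0 : PySem.List.pyGetD ((List.range (a.length + 1)).map (pf a)) 0 0 = 0 := by
    rw [hidx (pf a) 0 le_rfl (by positivity)]; rfl
  have hQ0 : PySem.List.pyGetD ((List.range (a.length + 1)).map (qf a)) 0 0 = 0 := by
    rw [hidx (qf a) 0 le_rfl (by positivity)]; rfl
  have hPk : PySem.List.pyGetD ((List.range (a.length + 1)).map (pf a)) (0 + k) 0 = pf a k.toNat := by
    rw [zero_add, hidx (pf a) k hk0 hkn']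
  have hQk : PySem.List.pyGetD ((List.range (a.length + 1)).map (qf a)) (0 + k) 0 = qf a k.toNat := by
    rw [zero_add, hidx (qf a) k hk0 hkn']
  rw [hP0, hQ0, hPk, hQk]
  have hinit : 2 * (qf a k.toNat - 0) - (2 * 0 + k - 1) * (pf a k.toNat - 0)
      = 2 * qf a k.toNat - (k - 1) * pf a k.toNat := by ring
  rw [hinit]
  by_cases hsmall : (a.length : Int) - k ≤ 1
  · rw [PySem.List.pyRange_one_eq_nil hsmall]
    rfl
  · have hm1 : 1 ≤ ((a.length : Int) - k).toNat := by omega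
    rw [show PySem.List.pyRange 1 ((a.length : Int) - k)
          = PySem.List.pyRange 1 ((((a.length : Int) - k).toNat : Nat) : Int) from by
        rw [Int.toNat_of_nonneg (by omega)]]
    rw [loop2 a k ((a.length : Int) - k).toNat hk0 hm1 (by omega)]
    dsimp only
    refine (PySem.List.foldl_congr_mem _ _ _ _ ?_).symm
    intro acc l hl
    rw [PySem.List.mem_pyRange_one] at hl
    have hl0 : 0 ≤ l := by omega
    have hlk : l + k ≤ (a.length : Int) := by omega
    rw [hidx (pf a) l hl0 (by omega), hidx (qf a) l hl0 (by omega),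
        hidx (pf a) (l + k) (by omega) hlk, hidx (qf a) (l + k) (by omega) hlk]
    rw [Wn, show (l + k).toNat = l.toNat + k.toNat from by omega,
        Int.toNat_of_nonneg hl0]
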